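-- pv_equiv track=rewrite | github.com/GoWeiXH/ChineseChatBot | search.py | __unfold_and_select
-- ===== SOURCE A (Python) =====
-- import itertools
--
-- def __unfold_and_select(data, select, mod):
--     index_entity = set()
--
--     if mod == '&':
--         for i, s in enumerate(select):
--             item_set = set(data[s])
--             if i == 0:
--                 index_entity = item_set
--             else:
--                 index_entity &= item_set
--
--     if mod == '|':
--         for key, values in data.items():
--             for s, t in itertools.product([key], values):
--                 if select is not None and s not in select:
--                     continue
--                 else:
--                     index_entity.add(t)
--     return index_entity
-- ===== SOURCE B (Python) =====
-- def __unfold_and_select(data, select, mod):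
--     if mod == '&':
--         keys = list(dict.fromkeys(select))
--         counter = {}
--         for s in keys:
--             for v in set(data[s]):
--                 counter[v] = counter.get(v, 0) + 1
--         return {v for v, n in counter.items() if n == len(keys)}
--     if mod == '|':
--         result = set()
--         for key, values in data.items():
--             if select is None or key in select:
--                 result.update(values)
--         return result
--     return set()
-- ===== Notes on version B (the rewrite author's own statement) =====
-- stated objective: alternative
-- what changed: The '&' branch replaces the running set-intersection over enumerate(select) with a tally: dedupe the select keys, count each entity's occurrences across the key's value-sets in a plain dict, and keep entities whose count equals the number of distinct keys; the '|' branch drops itertools.product and filters once per key, updating with the whole value list.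
import Mathlib
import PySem

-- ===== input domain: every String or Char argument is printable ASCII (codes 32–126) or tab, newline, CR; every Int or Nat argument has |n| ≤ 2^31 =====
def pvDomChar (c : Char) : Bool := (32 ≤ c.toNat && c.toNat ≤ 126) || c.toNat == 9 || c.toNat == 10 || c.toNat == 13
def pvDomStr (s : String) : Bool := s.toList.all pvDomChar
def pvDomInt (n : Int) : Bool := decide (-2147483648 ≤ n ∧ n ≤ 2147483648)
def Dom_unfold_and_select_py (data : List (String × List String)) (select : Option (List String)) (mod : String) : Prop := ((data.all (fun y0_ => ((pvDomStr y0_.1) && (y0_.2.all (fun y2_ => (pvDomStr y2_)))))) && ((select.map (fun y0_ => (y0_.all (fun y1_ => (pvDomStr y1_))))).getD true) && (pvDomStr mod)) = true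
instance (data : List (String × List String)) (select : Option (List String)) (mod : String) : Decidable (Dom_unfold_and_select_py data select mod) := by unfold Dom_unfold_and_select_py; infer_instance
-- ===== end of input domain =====

-- ===== PORT A =====
-- B replaces the '&' intersection fold with a count-and-filter tally and simplifies the '|' scan;
-- equivalence of the returned value (both Pythons return sets; the ports return their element lists
-- in first-insertion order, proved equal as lists).
def unfold_and_select_py (data : List (String × List String)) (select : Option (List String)) (mod : String) : List String :=
  let index_entity : PySem.Set String := PySem.Set.empty
  let index_entity :=
    if mod == "&" then
      match select with
      | none => index_entity  -- Python raises TypeError here (enumerate(None)); excluded by Pre_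
      | some sel =>
        (PySem.List.enumerate sel).foldl (fun acc p =>
          -- data[s] raises KeyError when s is not a key; excluded by Pre_
          let item_set := PySem.Set.ofList (PySem.Dict.getD ⟨data⟩ p.2 [])
          if p.1 == 0 then item_set else PySem.Set.inter acc item_set) index_entity
    else index_entity
  if mod == "|" then
    (PySem.Dict.mk data).items.foldl (fun acc kv =>
      -- itertools.product([key], values) = values paired with the constant key
      (kv.2.map (fun t => (kv.1, t))).foldl (fun acc st =>
        if (match select with | some sl => !(sl.contains st.1) | none => false) then acc
        else PySem.Set.add acc st.2) acc) index_entity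
  else index_entity

-- ===== PORT B =====
def unfold_and_select_py_alt (data : List (String × List String)) (select : Option (List String)) (mod : String) : List String :=
  if mod == "&" then
    match select with
    | none => []  -- B raises TypeError here too (dict.fromkeys(None)); excluded by Pre_
    | some sel =>
      let keys := PySem.List.dedup sel
      let counter : PySem.Dict String Int :=
        keys.foldl (fun d s =>
          -- data[s] raises KeyError when s is not a key; excluded by Pre_
          (PySem.Set.ofList (PySem.Dict.getD ⟨data⟩ s [])).foldl
            (fun d v => d.modify v 0 (· + 1)) d) PySem.Dict.empty
      (counter.items.filter (fun p => p.2 == (keys.length : Int))).map (·.1)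
  else if mod == "|" then
    (PySem.Dict.mk data).items.foldl (fun acc kv =>
      if (match select with | none => true | some sl => sl.contains kv.1) then
        PySem.Set.update acc kv.2
      else acc) PySem.Set.empty
  else []

-- ===== PRECONDITION & SPEC =====
-- Pre_ excludes exactly the inputs where A raises: mod == '&' with select=None (TypeError from
-- enumerate(None)) or with some selected key missing from data (KeyError from data[s]).
def Pre_unfold_and_select_py (data : List (String × List String)) (select : Option (List String)) (mod : String) : Prop :=
  mod = "&" → select.isSome = true ∧ ∀ s ∈ select.getD [], (PySem.Dict.mk data).contains s = true
instance (data : List (String × List String)) (select : Option (List String)) (mod : String) : Decidable (Pre_unfold_and_select_py data select mod) := by unfold Pre_unfold_and_select_py; infer_instance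

def pvWitness_unfold_and_select_py : (List (String × List String)) × Option (List String) × String :=
  ([("a", ["x", "y"]), ("b", ["y"])], some ["a", "b"], "&")

def Spec_unfold_and_select_py (data : List (String × List String)) (select : Option (List String)) (mod : String) (out : List String) : Prop := out = unfold_and_select_py_alt data select mod
instance (data : List (String × List String)) (select : Option (List String)) (mod : String) (out : List String) : Decidable (Spec_unfold_and_select_py data select mod out) := by unfold Spec_unfold_and_select_py; infer_instance

-- ===== CLAIM (what is proved, stated in full; the proofs are below) =====
def Claim_equal_unfold_and_select_py : Prop := ∀ (data : List (String × List String)) (select : Option (List String)) (mod : String), Dom_unfold_and_select_py data select mod → Pre_unfold_and_select_py data select mod → Spec_unfold_and_select_py data select mod (unfold_and_select_py data select mod)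

-- ===== LEMMAS AND PROOFS =====

-- A's '&' loop after the first step: every index is nonzero, so every later step intersects.
lemma enum_fold_eq_inter_fold (f : String → PySem.Set String) (rest : List String) (i : Int)
    (hi : 0 < i) (acc : PySem.Set String) :
    (PySem.List.enumerate rest i).foldl (fun acc p =>
        if p.1 == 0 then f p.2 else PySem.Set.inter acc (f p.2)) acc
      = rest.foldl (fun acc s => PySem.Set.inter acc (f s)) acc := by
  induction rest generalizing i acc with
  | nil => rfl
  | cons s rest ih =>
    rw [PySem.List.enumerate_cons]
    simp only [List.foldl_cons]
    rw [if_neg (by simp; omega)]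
    exact ih (i + 1) (by omega) _

-- a fold of intersections is one filter by membership in every later set
lemma inter_fold_eq_filter (f : String → PySem.Set String) (l : List String) (S : PySem.Set String) :
    l.foldl (fun acc s => PySem.Set.inter acc (f s)) S
      = S.filter (fun v => l.all (fun s => (f s).contains v)) := by
  induction l generalizing S with
  | nil => simp
  | cons a l ih =>
    rw [List.foldl_cons, ih]
    simp only [PySem.Set.inter, List.filter_filter, List.all_cons]
    exact List.filter_congr (fun v _ => by rw [Bool.and_comm])

-- B's nested counting loop is the Counter of the concatenation of the value-sets
lemma counter_fold_eq_counter (f : String → PySem.Set String) (keys : List String) :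
    keys.foldl (fun d s => (f s).foldl (fun d v => d.modify v 0 (· + 1)) d) PySem.Dict.empty
      = PySem.Dict.counter (keys.flatMap f) := by
  rw [PySem.Dict.counter_eq_foldl, List.foldl_flatMap]

-- count of v in the concatenation = number of keys whose value-set contains v
lemma count_flatMap_sets (f : String → PySem.Set String) (hf : ∀ s, (f s).Nodup)
    (keys : List String) (v : String) :
    (keys.flatMap f).count v = keys.countP (fun s => (f s).contains v) := by
  induction keys with
  | nil => rfl
  | cons a keys ih =>
    rw [List.flatMap_cons, List.count_append, List.countP_cons, ih]
    by_cases h : (f a).contains v = true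
    · have hm : v ∈ f a := by simpa using h
      have h1 := List.count_eq_one_of_mem (hf a) hm
      rw [h1]
      simp [hm, Nat.add_comm]
    · have hm : v ∉ f a := by simpa using h
      have h0 := List.count_eq_zero_of_not_mem hm
      rw [h0]
      simp [hm]


-- the '&' branch: A's intersection fold equals B's count-and-filter, for any value lookup g
lemma amp_case (g : String → List String) (sel : List String) :
    (PySem.List.enumerate sel).foldl (fun acc p =>
        let item_set := PySem.Set.ofList (g p.2)
        if p.1 == 0 then item_set else PySem.Set.inter acc item_set) PySem.Set.empty
    = (((PySem.List.dedup sel).foldl (fun d s =>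
          (PySem.Set.ofList (g s)).foldl (fun d v => d.modify v 0 (· + 1)) d)
          PySem.Dict.empty).items.filter
            (fun p => p.2 == ((PySem.List.dedup sel).length : Int))).map (·.1) := by
  cases sel with
  | nil => rfl
  | cons s0 rest =>
    have hf : ∀ s, (PySem.Set.ofList (g s)).Nodup := fun s => PySem.Set.nodup_ofList _
    let f : String → PySem.Set String := fun s => PySem.Set.ofList (g s)
    let K : List String := PySem.Set.ofList (s0 :: rest)
    let L : List String := K.flatMap f
    -- left side: one filter over the first value-set
    have hA : (PySem.List.enumerate (s0 :: rest)).foldl (fun acc p =>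
          let item_set := PySem.Set.ofList (g p.2)
          if p.1 == 0 then item_set else PySem.Set.inter acc item_set) PySem.Set.empty
        = (f s0).filter (fun v => rest.all (fun s => (f s).contains v)) := by
      have hzeta : (fun (acc : PySem.Set String) (p : Int × String) =>
            let item_set := PySem.Set.ofList (g p.2)
            if p.1 == 0 then item_set else PySem.Set.inter acc item_set)
          = (fun acc p => if p.1 == 0 then f p.2 else PySem.Set.inter acc (f p.2)) := rfl
      rw [hzeta, PySem.List.enumerate_cons, List.foldl_cons]
      have h0 : (if (((0 : Int), s0).1 == 0) = true then f ((0 : Int), s0).2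
            else PySem.Set.inter PySem.Set.empty (f ((0 : Int), s0).2)) = f s0 := by simp
      rw [h0]
      simp only [zero_add]
      rw [enum_fold_eq_inter_fold f rest 1 (by norm_num), inter_fold_eq_filter]
    rw [hA]
    -- right side: the filtered counter
    have hB : (((PySem.List.dedup (s0 :: rest)).foldl (fun d s =>
            (PySem.Set.ofList (g s)).foldl (fun d v => d.modify v 0 (· + 1)) d)
            PySem.Dict.empty).items.filter
              (fun p => p.2 == ((PySem.List.dedup (s0 :: rest)).length : Int))).map (·.1)
        = (PySem.Set.ofList L).filter (fun v => ((L.count v : Int) == (K.length : Int))) := by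
      have hd : PySem.List.dedup (s0 :: rest) = K := rfl
      rw [hd, counter_fold_eq_counter f K, PySem.Dict.items_counter, List.filter_map,
        List.map_map]
      simp only [Function.comp_def, List.map_id']
      rfl
    rw [hB]
    -- split set(L) into the first value-set plus later-only elements
    have hKcons : K = s0 :: PySem.Set.discard (PySem.Set.ofList rest) s0 :=
      PySem.Set.ofList_cons s0 rest
    have hofL : PySem.Set.ofList L
        = f s0 ++ (PySem.Set.ofList ((PySem.Set.discard (PySem.Set.ofList rest) s0).flatMap f)).filter
            (fun y => !(PySem.Set.contains (f s0) y)) := by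
      have hLsplit : L = f s0 ++ (PySem.Set.discard (PySem.Set.ofList rest) s0).flatMap f := by
        show K.flatMap f = _
        rw [hKcons, List.flatMap_cons]
      rw [hLsplit, PySem.Set.ofList_append]
      have h1 : PySem.Set.ofList (f s0) = f s0 := PySem.Set.ofList_ofList (g s0)
      rw [h1, PySem.Set.update_eq_append_filter]
    -- counts: count in L = number of keys of K whose value-set contains v
    have hcount : ∀ v, L.count v = K.countP (fun s => (f s).contains v) :=
      fun v => count_flatMap_sets f hf K v
    have hKlen : K.length = (PySem.Set.discard (PySem.Set.ofList rest) s0).length + 1 := by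
      rw [hKcons]; rfl
    -- elements missing from the first value-set never reach the full count
    have hE : ((PySem.Set.ofList ((PySem.Set.discard (PySem.Set.ofList rest) s0).flatMap f)).filter
          (fun y => !(PySem.Set.contains (f s0) y))).filter
            (fun v => ((L.count v : Int) == (K.length : Int))) = [] := by
      apply List.filter_eq_nil_iff.mpr
      intro y hy
      have hnc : PySem.Set.contains (f s0) y = false := by
        have := (List.mem_filter.mp hy).2
        simpa using this
      have hlt : L.count y < K.length := by
        rw [hcount y, hKcons, List.countP_cons]
        simp only [hnc, Bool.false_eq_true, if_false]
        have := List.countP_le_length (p := fun s => (f s).contains y)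
          (l := PySem.Set.discard (PySem.Set.ofList rest) s0)
        simp only [List.length_cons]
        omega
      intro hyq
      have h' : (L.count y : Int) = (K.length : Int) := by simpa using hyq
      have : L.count y = K.length := by exact_mod_cast h'
      omega
    rw [hofL, List.filter_append, hE, List.append_nil]
    -- pointwise on the first value-set: all-later-sets ↔ full count
    apply List.filter_congr
    intro v hv
    have hc0 : (f s0).contains v = true := List.elem_eq_true_of_mem hv
    apply Bool.eq_iff_iff.mpr
    rw [List.all_eq_true, beq_iff_eq]
    constructor
    · intro hall
      have hK : ∀ s ∈ K, (f s).contains v = true := by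
        intro ss hs
        have hs' : ss ∈ s0 :: rest := (PySem.Set.mem_ofList (s0 :: rest) ss).mp hs
        rcases List.mem_cons.mp hs' with rfl | hs''
        · exact hc0
        · exact hall ss hs''
      have := List.countP_eq_length.mpr hK
      rw [hcount v, this]
    · intro hq
      have hcnt : K.countP (fun s => (f s).contains v) = K.length := by
        have : (L.count v : Int) = (K.length : Int) := hq
        have h' : L.count v = K.length := by exact_mod_cast this
        rw [← hcount v, h']
      have hK := List.countP_eq_length.mp hcnt
      intro ss hs
      exact hK ss ((PySem.Set.mem_ofList (s0 :: rest) ss).mpr (List.mem_cons_of_mem s0 hs))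

-- one '|' step: adding each value of a key under a per-value test equals one conditional update
lemma bar_inner (select : Option (List String)) (k : String) (vs : List String)
    (acc : PySem.Set String) :
    (vs.map (fun t => (k, t))).foldl (fun acc st =>
      if ((match select with | some sl => !(sl.contains st.1) | none => false) : Bool) then acc
      else PySem.Set.add acc st.2) acc
    = if ((match select with | none => true | some sl => sl.contains k) : Bool) then
        PySem.Set.update acc vs
      else acc := by
  rw [List.foldl_map]
  cases select with
  | none => simp [PySem.Set.update]
  | some sl =>
    by_cases hk : k ∈ sl
    · simp [hk, PySem.Set.update]
    · simp [hk, List.foldl_fixed]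

-- the '|' branch: A's per-value conditional add equals B's per-key conditional update
lemma bar_case (data : List (String × List String)) (select : Option (List String)) :
    data.foldl (fun acc kv =>
        (kv.2.map (fun t => (kv.1, t))).foldl (fun acc st =>
          if ((match select with | some sl => !(sl.contains st.1) | none => false) : Bool) then acc
          else PySem.Set.add acc st.2) acc) PySem.Set.empty
    = data.foldl (fun acc kv =>
        if ((match select with | none => true | some sl => sl.contains kv.1) : Bool) then
          PySem.Set.update acc kv.2
        else acc) PySem.Set.empty := by
  simp only [bar_inner]

-- ===== VERDICT (by name: the statement is the Claim_ definition above) =====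
theorem unfold_and_select_py_spec : Claim_equal_unfold_and_select_py := by
  intro data select mod hdom hpre
  unfold Spec_unfold_and_select_py unfold_and_select_py unfold_and_select_py_alt
  by_cases hamp : mod = "&"
  · subst hamp
    obtain ⟨hsome, -⟩ := hpre rfl
    obtain ⟨sel, rfl⟩ := Option.isSome_iff_exists.mp hsome
    simpa using amp_case (fun s => PySem.Dict.getD ⟨data⟩ s []) sel
  · by_cases hbar : mod = "|"
    · subst hbar
      have h1 : (("|" : String) == "&") = false := by decide
      simpa [h1] using bar_case data select
    · have h1 : (mod == "&") = false := by simpa using hamp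
      have h2 : (mod == "|") = false := by simpa using hbar
      simp [h1, h2]
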